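-- pv_equiv track=rewrite | github.com/HaydenInEdinburgh/LintCode | 270_letter_combinations_of_a_phone_number_II.py | letterCombinationsII
-- ===== SOURCE A (Python) =====
-- REVERSE_KEYBOARD = {
--     "a": "2", "b": "2", "c": "2",
--     "d": "3", "e": "3", "f": "3",
--     "g": "4", "h": "4", "i": "4",
--     "j": "5", "k": "5", "l": "5",
--     "m": "6", "n": "6", "o": "6",
--     "p": "7", "q": "7", "r": "7", "s": "7",
--     "t": "8", "u": "8", "v": "8",
--     "w": "9", "x": "9", "y": "9", "z": "9",
-- }
--
-- class TrieNode:
--     def __init__(self):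
--         self.word_count = 0
--         self.children = {}
--
--     def add(self, word):
--         node = self
--         for char in word:
--             if char not in node.children:
--                 node.children[char] = TrieNode()
--             node = node.children[char]
--             node.word_count += 1
--
-- def letterCombinationsII(queries, dict):
--     root = TrieNode()
--     for word in dict:
--         digit_word = ''.join([REVERSE_KEYBOARD[char] for char in word])
--         root.add(digit_word)
--
--     res = []
--     for query in queries:
--         node = root
--         for digit in query:
--             if digit not in node.children:
--                 node = None
--                 break
--             node = node.children[digit]
--         res.append(node.word_count if node else 0)
--     return res
-- ===== SOURCE B (Python) =====
-- REVERSE_KEYBOARD = {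
--     "a": "2", "b": "2", "c": "2",
--     "d": "3", "e": "3", "f": "3",
--     "g": "4", "h": "4", "i": "4",
--     "j": "5", "k": "5", "l": "5",
--     "m": "6", "n": "6", "o": "6",
--     "p": "7", "q": "7", "r": "7", "s": "7",
--     "t": "8", "u": "8", "v": "8",
--     "w": "9", "x": "9", "y": "9", "z": "9",
-- }
--
-- def letterCombinationsII(queries, dict):
--     counts = {}
--     for word in dict:
--         digit_word = ''.join([REVERSE_KEYBOARD[char] for char in word])
--         for i in range(1, len(digit_word) + 1):
--             prefix = digit_word[:i]
--             counts[prefix] = counts.get(prefix, 0) + 1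
--     return [counts.get(query, 0) for query in queries]
-- ===== Notes on version B (the rewrite author's own statement) =====
-- stated objective: simpler
-- what changed: Replaces the trie (node objects with per-digit child dicts and a per-character descent per query) by a single flat hash map from digit-prefix strings to counts, built in one pass over the dictionary and answered with one lookup per query.
import Mathlib
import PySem

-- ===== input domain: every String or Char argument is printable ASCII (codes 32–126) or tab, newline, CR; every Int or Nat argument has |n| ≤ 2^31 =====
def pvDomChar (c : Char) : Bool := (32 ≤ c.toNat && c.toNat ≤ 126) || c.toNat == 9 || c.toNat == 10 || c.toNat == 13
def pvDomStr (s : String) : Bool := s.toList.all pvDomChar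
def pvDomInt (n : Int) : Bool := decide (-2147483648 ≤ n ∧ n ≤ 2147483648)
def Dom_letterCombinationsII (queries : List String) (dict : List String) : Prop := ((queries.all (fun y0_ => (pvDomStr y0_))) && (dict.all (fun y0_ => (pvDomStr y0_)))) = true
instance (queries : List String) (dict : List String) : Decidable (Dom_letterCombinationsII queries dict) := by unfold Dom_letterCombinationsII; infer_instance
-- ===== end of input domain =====

-- B replaces A's trie (nodes with per-digit child dicts, descended one character at a
-- time per query) by one flat hash map digit-prefix → count, answered with a single
-- lookup per query; objective: simpler.

-- ===== PORT A =====

-- REVERSE_KEYBOARD (shared module constant, used verbatim by both A and B)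
def pvReverseKeyboard : PySem.Dict String String := PySem.Dict.ofList [
  ("a", "2"), ("b", "2"), ("c", "2"),
  ("d", "3"), ("e", "3"), ("f", "3"),
  ("g", "4"), ("h", "4"), ("i", "4"),
  ("j", "5"), ("k", "5"), ("l", "5"),
  ("m", "6"), ("n", "6"), ("o", "6"),
  ("p", "7"), ("q", "7"), ("r", "7"), ("s", "7"),
  ("t", "8"), ("u", "8"), ("v", "8"),
  ("w", "9"), ("x", "9"), ("y", "9"), ("z", "9")]

-- ''.join([REVERSE_KEYBOARD[char] for char in word]); the .getD "" default never
-- fires under Pre_ (Python raises KeyError there, excluded by Pre_)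
def pvDigitWord (w : String) : String :=
  PySem.Str.join "" (w.toList.map (fun c => (pvReverseKeyboard.get? (String.singleton c)).getD ""))

-- TrieNode: word_count plus an (insertion-ordered) child map; Python's nested dict of
-- nodes is a nested inductive, encoded as the allowed mutual pair
mutual
inductive PVTrie : Type where
  | mk : Int → PVChildren → PVTrie
  deriving DecidableEq
inductive PVChildren : Type where
  | nil : PVChildren
  | cons : Char → PVTrie → PVChildren → PVChildren
  deriving DecidableEq
end

-- node.word_count += 1
def pvIncr : PVTrie → PVTrie
  | .mk c ch => .mk (c + 1) ch

-- 'if char not in node.children: node.children[char] = TrieNode()' then step into the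
-- child and continue (go = the continuation on the rest of the word)
def pvChildUpd : PVChildren → Char → (PVTrie → PVTrie) → PVChildren
  | .nil, d, go => .cons d (go (.mk 0 .nil)) .nil
  | .cons e t tail, d, go =>
      if e = d then .cons e (go t) tail else .cons e t (pvChildUpd tail d go)

-- TrieNode.add: for char in word: (create child if absent); node = child; node.word_count += 1
def pvTrieAdd : PVTrie → List Char → PVTrie
  | t, [] => t
  | .mk c ch, d :: rest => .mk c (pvChildUpd ch d (fun t' => pvTrieAdd (pvIncr t') rest))
termination_by _ w => w.length

-- node.children.get(digit)
def pvChildGet : PVChildren → Char → Option PVTrie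
  | .nil, _ => none
  | .cons e t tail, d => if e = d then some t else pvChildGet tail d

-- the query loop: descend digit by digit; None → 0, else node.word_count
def pvTrieGet : PVTrie → List Char → Int
  | .mk c _, [] => c
  | .mk _ ch, d :: rest =>
      match pvChildGet ch d with
      | none => 0
      | some t => pvTrieGet t rest

def letterCombinationsII (queries : List String) (dict : List String) : List Int :=
  let root := dict.foldl (fun t w => pvTrieAdd t (pvDigitWord w).toList) (.mk 0 .nil)
  queries.map (fun q => pvTrieGet root q.toList)

-- ===== PORT B =====

-- for i in range(1, len(digit_word)+1): p = digit_word[:i]; counts[p] = counts.get(p, 0) + 1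
def pvAddWord (counts : PySem.Dict String Int) (word : String) : PySem.Dict String Int :=
  (PySem.List.pyRange 1 ((PySem.Str.len (pvDigitWord word) : Int) + 1) 1).foldl
    (fun d i =>
      d.insert (PySem.Str.slice (pvDigitWord word) none (some i))
        (d.getD (PySem.Str.slice (pvDigitWord word) none (some i)) 0 + 1)) counts

def letterCombinationsII_alt (queries : List String) (dict : List String) : List Int :=
  let counts := dict.foldl pvAddWord PySem.Dict.empty
  queries.map (fun q => counts.getD q 0)

-- ===== PRECONDITION & SPEC =====

-- Pre_ excludes dict words containing any character outside 'a'..'z': there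
-- REVERSE_KEYBOARD[char] raises KeyError in Python A (and in B alike).
def Pre_letterCombinationsII (queries : List String) (dict : List String) : Prop :=
  (dict.all (fun w => w.toList.all (fun c => 'a' ≤ c && c ≤ 'z'))) = true
instance (queries : List String) (dict : List String) : Decidable (Pre_letterCombinationsII queries dict) := by
  unfold Pre_letterCombinationsII; infer_instance

def pvWitness_letterCombinationsII : List String × List String := (["2", "23", "9"], ["ad", "ae", "z"])

def Spec_letterCombinationsII (queries : List String) (dict : List String) (out : List Int) : Prop := out = letterCombinationsII_alt queries dict
instance (queries : List String) (dict : List String) (out : List Int) : Decidable (Spec_letterCombinationsII queries dict out) := by unfold Spec_letterCombinationsII; infer_instance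

-- ===== CLAIM (what is proved, stated in full; the proofs are below) =====
def Claim_equal_letterCombinationsII : Prop := ∀ (queries : List String) (dict : List String), Dom_letterCombinationsII queries dict → Pre_letterCombinationsII queries dict → Spec_letterCombinationsII queries dict (letterCombinationsII queries dict)

-- ===== LEMMAS AND PROOFS =====

-- common specification: how many dict words have digit string with q as nonempty prefix
def pvCnt (q : List Char) : List String → Int
  | [] => 0
  | w :: ws => (if q ≠ [] ∧ q <+: (pvDigitWord w).toList then 1 else 0) + pvCnt q ws

theorem pvTrieGet_incr (t : PVTrie) (q : List Char) :
    pvTrieGet (pvIncr t) q = pvTrieGet t q + (if q = [] then 1 else 0) := by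
  cases t with
  | mk c ch => cases q <;> simp [pvIncr, pvTrieGet]

theorem pvChildGet_upd_ne (ch : PVChildren) (e d : Char) (go : PVTrie → PVTrie) (h : d ≠ e) :
    pvChildGet (pvChildUpd ch e go) d = pvChildGet ch d := by
  cases ch with
  | nil => simp [pvChildUpd, pvChildGet, Ne.symm h]
  | cons f t tail =>
      have ih := pvChildGet_upd_ne tail e d go h
      by_cases hf : f = e
      · subst hf; simp [pvChildUpd, pvChildGet, Ne.symm h]
      · simp [pvChildUpd, pvChildGet, hf, ih]

theorem pvChildGet_upd_self (ch : PVChildren) (e : Char) (go : PVTrie → PVTrie) :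
    pvChildGet (pvChildUpd ch e go) e = some (go ((pvChildGet ch e).getD (.mk 0 .nil))) := by
  cases ch with
  | nil => simp [pvChildUpd, pvChildGet]
  | cons f t tail =>
      have ih := pvChildGet_upd_self tail e go
      by_cases hf : f = e
      · subst hf; simp [pvChildUpd, pvChildGet]
      · simp [pvChildUpd, pvChildGet, hf, ih]

theorem pvTrieGet_zero (q : List Char) : pvTrieGet (.mk 0 .nil) q = 0 := by
  cases q <;> simp [pvTrieGet, pvChildGet]

theorem pvTrieGet_add (q : List Char) (t : PVTrie) (w : List Char) :
    pvTrieGet (pvTrieAdd t w) q = pvTrieGet t q + (if q ≠ [] ∧ q <+: w then 1 else 0) := by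
  induction q generalizing t w with
  | nil =>
      cases t with
      | mk c ch => cases w <;> simp [pvTrieAdd, pvTrieGet]
  | cons d qs ih =>
      cases t with
      | mk c ch =>
        cases w with
        | nil => simp [pvTrieAdd]
        | cons e rest =>
          by_cases hde : d = e
          · subst hde
            simp only [pvTrieAdd, pvTrieGet, pvChildGet_upd_self]
            rw [ih, pvTrieGet_incr]
            rcases h0 : pvChildGet ch d with _ | t'
            · simp only [Option.getD_none]
              rw [pvTrieGet_zero]
              rcases qs with _ | ⟨x, xs⟩
              · simp
              · by_cases hp : (x :: xs) <+: rest <;> simp [hp]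
            · simp only [Option.getD_some]
              rcases qs with _ | ⟨x, xs⟩
              · simp
              · by_cases hp : (x :: xs) <+: rest <;> simp [hp]
          · simp only [pvTrieAdd, pvTrieGet, pvChildGet_upd_ne ch e d _ hde]
            have hnp : ¬ ((d :: qs) <+: (e :: rest)) := by
              intro hpre
              exact hde (List.cons_prefix_cons.mp hpre).1
            simp [hnp]

theorem pvTrieGet_foldl (ws : List String) (t : PVTrie) (q : List Char) :
    pvTrieGet (ws.foldl (fun t w => pvTrieAdd t (pvDigitWord w).toList) t) q
      = pvTrieGet t q + pvCnt q ws := by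
  induction ws generalizing t with
  | nil => simp [pvCnt]
  | cons w ws ih =>
      simp only [List.foldl_cons, ih, pvTrieGet_add, pvCnt]
      ring

-- B side: one word's inner loop counts each nonempty prefix of its digit string once
theorem pvCount_prefixes (dw q : String) :
    ((PySem.List.pyRange 1 ((dw.toList.length : Int) + 1) 1).map
        (fun i => PySem.Str.slice dw none (some i))).count q
      = if q.toList ≠ [] ∧ q.toList <+: dw.toList then 1 else 0 := by
  rw [PySem.List.pyRange_one]
  have hn : (((dw.toList.length : Int) + 1) - 1).toNat = dw.toList.length := by omega
  rw [hn, List.map_map, List.count_eq_countP, List.countP_map]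
  have hcong : ∀ k ∈ List.range dw.toList.length,
      ((· == q) ∘ (fun i => PySem.Str.slice dw none (some i)) ∘ (fun k : Nat => (1 : Int) + k)) k
        = decide (q.toList <+: dw.toList ∧ k + 1 = q.toList.length) := by
    intro k hk
    have hkn : k < dw.toList.length := List.mem_range.mp hk
    simp only [Function.comp]
    have h1 : (1 : Int) + (k : Int) = ((k + 1 : Nat) : Int) := by push_cast; ring
    have hsl : (PySem.Str.slice dw none (some ((1 : Int) + k))).toList = dw.toList.take (k + 1) := by
      rw [PySem.Str.toList_slice, PySem.Chars.slice_eq_listSlice, h1, PySem.List.slice_to_natCast]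
    rcases Decidable.em (q.toList <+: dw.toList ∧ k + 1 = q.toList.length) with h | h
    · have heq : PySem.Str.slice dw none (some ((1 : Int) + k)) = q := by
        apply String.toList_inj.mp
        rw [hsl, h.2]
        exact (List.prefix_iff_eq_take.mp h.1).symm
      rw [show (PySem.Str.slice dw none (some ((1 : Int) + k)) == q) = true from beq_iff_eq.mpr heq,
          decide_eq_true h]
    · have hne : ¬ (PySem.Str.slice dw none (some ((1 : Int) + k)) = q) := by
        intro he
        apply h
        have htl : dw.toList.take (k + 1) = q.toList := by rw [← hsl, he]
        constructor
        · rw [← htl]; exact List.take_prefix _ _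
        · have hlen : (dw.toList.take (k + 1)).length = q.toList.length := by rw [htl]
          rw [List.length_take] at hlen
          omega
      rw [show (PySem.Str.slice dw none (some ((1 : Int) + k)) == q) = false from
            beq_eq_false_iff_ne.mpr hne,
          decide_eq_false h]
  rw [List.countP_congr (fun x hx => by rw [hcong x hx])]
  by_cases hq : q.toList ≠ [] ∧ q.toList <+: dw.toList
  · have h1 : 0 < q.toList.length := List.length_pos_iff.mpr hq.1
    have h2 : q.toList.length ≤ dw.toList.length := hq.2.length_le
    have hcong2 : ∀ k ∈ List.range dw.toList.length,
        decide (q.toList <+: dw.toList ∧ k + 1 = q.toList.length)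
          = (k == q.toList.length - 1) := by
      intro k _
      have : (q.toList <+: dw.toList ∧ k + 1 = q.toList.length) ↔ (k = q.toList.length - 1) := by
        constructor
        · rintro ⟨-, hl⟩; omega
        · intro hkm; exact ⟨hq.2, by omega⟩
      rw [decide_eq_decide.mpr this]
      exact (Bool.beq_eq_decide_eq k (q.toList.length - 1)).symm
    rw [List.countP_congr (fun x hx => by rw [hcong2 x hx]), ← List.count_eq_countP, List.count_range,
        if_pos (by omega : q.toList.length - 1 < dw.toList.length), if_pos hq]
  · rw [if_neg hq]
    apply List.countP_eq_zero.mpr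
    intro k _ hdec
    rcases of_decide_eq_true hdec with ⟨hp, hl⟩
    exact hq ⟨by intro h0; rw [h0] at hl; simp at hl, hp⟩

theorem pv_foldl_map_helper {α β γ : Type} (f : β → γ) (g : α → γ → α) (l : List β) (init : α) :
    l.foldl (fun d i => g d (f i)) init = (l.map f).foldl g init := List.foldl_map.symm

theorem pvGetD_addWord (d : PySem.Dict String Int) (w q : String) :
    (pvAddWord d w).getD q 0
      = d.getD q 0 + (if q.toList ≠ [] ∧ q.toList <+: (pvDigitWord w).toList then 1 else 0) := by
  unfold pvAddWord
  rw [show (PySem.Str.len (pvDigitWord w) : Int) = ((pvDigitWord w).toList.length : Int) by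
        simp [PySem.Str.len_eq]]
  rw [pv_foldl_map_helper (f := fun i => PySem.Str.slice (pvDigitWord w) none (some i))
        (g := fun (d : PySem.Dict String Int) (p : String) => d.insert p (d.getD p 0 + 1))]
  rw [PySem.Dict.getD_foldl_insert_add_one, pvCount_prefixes]
  split <;> simp

theorem pvGetD_build (ws : List String) (d : PySem.Dict String Int) (q : String) :
    (ws.foldl pvAddWord d).getD q 0 = d.getD q 0 + pvCnt q.toList ws := by
  induction ws generalizing d with
  | nil => simp [pvCnt]
  | cons w ws ih =>
      simp only [List.foldl_cons, ih, pvGetD_addWord, pvCnt]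
      ring

-- ===== VERDICT (by name: the statement is the Claim_ definition above) =====
theorem letterCombinationsII_spec : Claim_equal_letterCombinationsII := by
  unfold Claim_equal_letterCombinationsII
  intro queries dict _ _
  unfold Spec_letterCombinationsII letterCombinationsII letterCombinationsII_alt
  apply List.map_congr_left
  intro q _
  rw [pvTrieGet_foldl, pvGetD_build, pvTrieGet_zero, PySem.Dict.getD_empty]
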